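-- pv_equiv track=rewrite | github.com/vincentkientz76-creator/MagneticPower-Systeem | Tools/Automation/runners/run_r73.py | classify_usage_and_collection
-- ===== SOURCE A (Python) =====
-- from typing import Dict, Tuple, List
--
-- def _norm(s: str) -> str:
--     return (s or "").strip().lower()
--
-- def classify_usage_and_collection(title: str, collections: str) -> Tuple[str, str]:
--     t = _norm(title)
--     c = _norm(collections)
--
--     # charging
--     if any(k in t for k in ["charger", "oplaad", "oplader", "qi", "qi2", "wireless charging", "magsafe"]) or "oplad" in c:
--         return "charging", "opladers_powerbanks"
--     # car / onderweg
--     if any(k in t for k in ["car", "auto", "dashboard", "vent", "mount", "houder"]) or "auto" in c: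
--         return "consumer_daily", "magnetische_autohouders"
--     # desk / work
--     if any(k in t for k in ["desk", "bureau", "stand", "houder", "organizer", "whiteboard", "board", "holder"]) or "werk" in c:
--         return "business_daily", "werkplek_thuis_accessoires"
--     # default daily
--     return "consumer_daily", "magnetische_accessoires"
-- ===== SOURCE B (Python) =====
-- from typing import Tuple
--
-- # Flat keyword -> priority table (lower priority wins; 'houder' appears in A's
-- # car and desk lists, so it gets the smaller priority 1) plus a collection
-- # substring -> priority table; the answer is the minimum matched priority.
-- _TITLE_KW = [
--     ("charger", 0), ("oplaad", 0), ("oplader", 0), ("qi", 0), ("qi2", 0),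
--     ("wireless charging", 0), ("magsafe", 0),
--     ("car", 1), ("auto", 1), ("dashboard", 1), ("vent", 1), ("mount", 1), ("houder", 1),
--     ("desk", 2), ("bureau", 2), ("stand", 2), ("organizer", 2),
--     ("whiteboard", 2), ("board", 2), ("holder", 2),
-- ]
-- _COLL_KW = [("oplad", 0), ("auto", 1), ("werk", 2)]
-- _RESULTS = [
--     ("charging", "opladers_powerbanks"),
--     ("consumer_daily", "magnetische_autohouders"),
--     ("business_daily", "werkplek_thuis_accessoires"),
--     ("consumer_daily", "magnetische_accessoires"),
-- ]
--
-- def classify_usage_and_collection(title: str, collections: str) -> Tuple[str, str]: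
--     t = (title or "").strip().lower()
--     c = (collections or "").strip().lower()
--     hits = [p for k, p in _TITLE_KW if k in t] + [p for k, p in _COLL_KW if k in c]
--     best = min(hits) if hits else 3
--     return _RESULTS[best]
-- ===== Notes on version B (the rewrite author's own statement) =====
-- stated objective: alternative
-- what changed: A's ordered first-match branch chain is replaced by a flat keyword->priority table ('houder' deduplicated to its first priority): B collects the priorities of all matching keywords/collection substrings and indexes the result table by their minimum (aggregation by min, no early-exit branch logic).
import Mathlib
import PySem

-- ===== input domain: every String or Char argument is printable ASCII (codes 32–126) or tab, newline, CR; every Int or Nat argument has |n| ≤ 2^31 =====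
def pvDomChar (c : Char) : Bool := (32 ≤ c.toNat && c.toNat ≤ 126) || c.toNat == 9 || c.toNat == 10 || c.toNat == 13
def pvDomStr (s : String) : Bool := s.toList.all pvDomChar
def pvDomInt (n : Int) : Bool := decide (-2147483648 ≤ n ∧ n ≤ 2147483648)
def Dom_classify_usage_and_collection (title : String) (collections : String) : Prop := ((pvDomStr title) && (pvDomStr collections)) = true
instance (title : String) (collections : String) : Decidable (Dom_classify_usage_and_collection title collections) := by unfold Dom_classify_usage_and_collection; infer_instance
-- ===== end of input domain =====

-- B replaces A's three branch blocks by one flat keyword->priority table: it collects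
-- the priorities of all matching keywords and returns the result of the minimum one
-- (aggregation by min instead of an ordered first-match branch chain); same results.

-- ===== PORT A =====
-- _norm: (s or "").strip().lower(); for a str argument 'or ""' keeps s (strip of "" is "" anyway)
def pvNorm (s : String) : String := PySem.Str.lower (PySem.Str.strip s)

def classify_usage_and_collection (title : String) (collections : String) : String × String :=
  let t := pvNorm title
  let c := pvNorm collections
  if (["charger", "oplaad", "oplader", "qi", "qi2", "wireless charging", "magsafe"].any
       (fun k => PySem.Str.isIn k t)) || PySem.Str.isIn "oplad" c then
    ("charging", "opladers_powerbanks")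
  else if (["car", "auto", "dashboard", "vent", "mount", "houder"].any
       (fun k => PySem.Str.isIn k t)) || PySem.Str.isIn "auto" c then
    ("consumer_daily", "magnetische_autohouders")
  else if (["desk", "bureau", "stand", "houder", "organizer", "whiteboard", "board", "holder"].any
       (fun k => PySem.Str.isIn k t)) || PySem.Str.isIn "werk" c then
    ("business_daily", "werkplek_thuis_accessoires")
  else
    ("consumer_daily", "magnetische_accessoires")

-- ===== PORT B =====
def pvTitleKW : List (String × Nat) :=
  [("charger", 0), ("oplaad", 0), ("oplader", 0), ("qi", 0), ("qi2", 0),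
   ("wireless charging", 0), ("magsafe", 0),
   ("car", 1), ("auto", 1), ("dashboard", 1), ("vent", 1), ("mount", 1), ("houder", 1),
   ("desk", 2), ("bureau", 2), ("stand", 2), ("organizer", 2),
   ("whiteboard", 2), ("board", 2), ("holder", 2)]

def pvCollKW : List (String × Nat) := [("oplad", 0), ("auto", 1), ("werk", 2)]

def pvResults : List (String × String) :=
  [("charging", "opladers_powerbanks"),
   ("consumer_daily", "magnetische_autohouders"),
   ("business_daily", "werkplek_thuis_accessoires"),
   ("consumer_daily", "magnetische_accessoires")]

def classify_usage_and_collection_alt (title : String) (collections : String) : String × String :=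
  let t := pvNorm title
  let c := pvNorm collections
  -- hits = [p for k, p in _TITLE_KW if k in t] + [p for k, p in _COLL_KW if k in c]
  let hits := (pvTitleKW.filter (fun kp => PySem.Str.isIn kp.1 t)).map Prod.snd
           ++ (pvCollKW.filter (fun kp => PySem.Str.isIn kp.1 c)).map Prod.snd
  -- best = min(hits) if hits else 3
  let best := (PySem.List.min? hits (fun x => x)).getD 3
  -- _RESULTS[best]: best ≤ 3 < len(_RESULTS), so plain in-range indexing (exact here)
  pvResults.getD best ("", "")

-- ===== PRECONDITION & SPEC =====
def Spec_classify_usage_and_collection (title : String) (collections : String) (out : String × String) : Prop := out = classify_usage_and_collection_alt title collections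
instance (title : String) (collections : String) (out : String × String) : Decidable (Spec_classify_usage_and_collection title collections out) := by unfold Spec_classify_usage_and_collection; infer_instance

-- ===== CLAIM (what is proved, stated in full; the proofs are below) =====
def Claim_equal_classify_usage_and_collection : Prop := ∀ (title : String) (collections : String), Dom_classify_usage_and_collection title collections → Spec_classify_usage_and_collection title collections (classify_usage_and_collection title collections)

-- ===== LEMMAS AND PROOFS =====

-- running min over a list of naturals < 3, characterized by membership
theorem pvFoldMinChar (l : List Nat) (x : Nat) (h : ∀ y ∈ x :: l, y < 3) :
    l.foldl min x =
      (if 0 ∈ x :: l then 0 else if 1 ∈ x :: l then 1 else if 2 ∈ x :: l then 2 else 3) := by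
  induction l generalizing x with
  | nil =>
      have hx := h x (by simp)
      interval_cases x <;> simp
  | cons y t ih =>
      have hxy : min x y < 3 := by
        have := h x (by simp); have := h y (by simp); omega
      have h' : ∀ z ∈ min x y :: t, z < 3 := by
        intro z hz
        rcases List.mem_cons.1 hz with rfl | hz
        · exact hxy
        · exact h z (by simp [hz])
      have := ih (min x y) h'
      rw [List.foldl_cons, this]
      have hx := h x (by simp); have hy := h y (by simp)
      interval_cases x <;> interval_cases y <;>
        simp [List.mem_cons]

theorem pvMinSel (l : List Nat) (h : ∀ y ∈ l, y < 3) :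
    (PySem.List.min? l (fun x => x)).getD 3 =
      (if 0 ∈ l then 0 else if 1 ∈ l then 1 else if 2 ∈ l then 2 else 3) := by
  cases l with
  | nil => simp [PySem.List.min?]
  | cons x t =>
      rw [PySem.List.min?_id_cons]
      simpa using pvFoldMinChar t x h

-- ===== VERDICT (by name: the statement is the Claim_ definition above) =====
theorem classify_usage_and_collection_spec : Claim_equal_classify_usage_and_collection := by
  intro title collections _
  unfold Spec_classify_usage_and_collection classify_usage_and_collection classify_usage_and_collection_alt
  dsimp only
  set t := pvNorm title with ht
  set c := pvNorm collections with hc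
  have hlt : ∀ y ∈ (pvTitleKW.filter (fun kp => PySem.Str.isIn kp.1 t)).map Prod.snd
           ++ (pvCollKW.filter (fun kp => PySem.Str.isIn kp.1 c)).map Prod.snd, y < 3 := by
    intro y hy
    simp [pvTitleKW, pvCollKW, List.mem_append, List.mem_map, List.mem_filter] at hy
    omega
  rw [pvMinSel _ hlt]
  simp only [pvTitleKW, pvCollKW, List.mem_append, List.mem_map, List.mem_filter,
    List.mem_cons, List.not_mem_nil, List.any_cons, List.any_nil, Bool.or_eq_true,
    Bool.or_false]
  split_ifs with h0 h1 h2 <;> simp_all [pvResults]
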